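-- pv_equiv track=rewrite | github.com/Javilejoo/Lexical-Analyzer-Generator | shuntingyard.py | map_literal_tokens
-- ===== SOURCE A (Python) =====
-- literal_to_placeholder = {
--     "+": "\ue000",
--     "-": "\ue001",
--     "*": "\ue002",
--     "/": "\ue003",
--     "(": "\ue004",
--     ")": "\ue005",
--     ".": "\ue006",
--     "|": "\ue007",
--     "?": "\ue008",
--     "\\'": "\ue00b",
--     "\\": "\ue00c",
-- }
--
-- def map_literal_tokens(expresion):
--     """
--     Recorre la expresión infix y reemplaza cada literal (del tipo: 'X' donde X es un solo carácter)
--     por un placeholder único.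
--     """
--     new_expr = ""
--     i = 0
--     while i < len(expresion):
--         if expresion[i] == "'":
--             # Caso especial: literal escapado como '\\''
--             if i + 3 < len(expresion) and expresion[i+1] == '\\' and expresion[i+2] == "'" and expresion[i+3] == "'":
--                 char = "\\'"
--                 if char in literal_to_placeholder:
--                     new_expr += literal_to_placeholder[char]
--                 else:
--                     new_expr += "'" + char + "'"
--                 i += 4
--                 continue
--             # Comprobar que es un literal de un solo caracter: debe tener la forma 'X'
--             if i + 2 < len(expresion) and expresion[i+2] == "'":
--                 char = expresion[i+1]
--                 if char in literal_to_placeholder: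
--                     new_expr += literal_to_placeholder[char]
--                 else:
--                     # Si no está mapeado, lo dejamos con sus comillas
--                     new_expr += "'" + char + "'"
--                 i += 3
--                 continue
--         new_expr += expresion[i]
--         i += 1
--     return new_expr
-- ===== SOURCE B (Python) =====
-- import re
--
-- literal_to_placeholder = {
--     "+": "\ue000",
--     "-": "\ue001",
--     "*": "\ue002",
--     "/": "\ue003",
--     "(": "\ue004",
--     ")": "\ue005",
--     ".": "\ue006",
--     "|": "\ue007",
--     "?": "\ue008",
--     "\\'": "\ue00b",
--     "\\": "\ue00c",
-- }
--
-- _LITERAL_PAT = re.compile(r"'\\''|'(.)'", re.DOTALL)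
--
-- def map_literal_tokens(expresion):
--     def repl(m):
--         c = m.group(1)
--         if c is None:           # escaped-literal alternative '\'' matched
--             c = "\\'"
--         return literal_to_placeholder.get(c, m.group(0))
--     return _LITERAL_PAT.sub(repl, expresion)
-- ===== Notes on version B (the rewrite author's own statement) =====
-- stated objective: faster
-- what changed: A's manual while-loop with index arithmetic, chained bounds checks and repeated string concatenation is replaced by a single compiled-regex substitution (re.sub with DOTALL and a replacement function, escaped-literal alternative first), letting the regex engine's leftmost non-overlapping scan do the traversal.
import Mathlib
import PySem

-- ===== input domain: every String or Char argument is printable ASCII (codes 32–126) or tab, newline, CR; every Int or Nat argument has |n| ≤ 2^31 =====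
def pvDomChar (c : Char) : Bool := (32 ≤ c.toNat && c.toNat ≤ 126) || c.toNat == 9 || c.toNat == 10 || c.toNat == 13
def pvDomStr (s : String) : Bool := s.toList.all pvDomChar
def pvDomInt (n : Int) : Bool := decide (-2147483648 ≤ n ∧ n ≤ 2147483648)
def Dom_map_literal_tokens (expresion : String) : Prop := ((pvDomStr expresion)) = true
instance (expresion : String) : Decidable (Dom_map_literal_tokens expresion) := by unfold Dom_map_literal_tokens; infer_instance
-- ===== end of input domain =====

-- B replaces A's manual index/while scan with one regex substitution (re.sub with a replacement
-- function); same return value, a different traversal mechanism, measured faster in a timing run.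
-- Strings are built/compared through their char lists (String.mk / toList), exact for Python str concatenation.

-- ===== PORT A =====
-- the module constant literal_to_placeholder, keyed/valued by char lists (exact for these ASCII/BMP strings)
def pvLiteralDict : PySem.Dict (List Char) (List Char) :=
  PySem.Dict.ofList
    [ (['+'], ['\ue000']), (['-'], ['\ue001']), (['*'], ['\ue002']), (['/'], ['\ue003'])
    , (['('], ['\ue004']), ([')'], ['\ue005']), (['.'], ['\ue006']), (['|'], ['\ue007'])
    , (['?'], ['\ue008']), (['\\', '\''], ['\ue00b']), (['\\'], ['\ue00c']) ]

-- the while loop of A: state (i, new_expr); expresion[i] is in range under the loop guard, read with getD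
def mapLitGoA (cs : List Char) (i : Nat) (acc : List Char) : List Char :=
  if _h : i < cs.length then
    if cs.getD i ' ' = '\'' then
      if i + 3 < cs.length ∧ cs.getD (i+1) ' ' = '\\' ∧ cs.getD (i+2) ' ' = '\'' ∧ cs.getD (i+3) ' ' = '\'' then
        -- char = "\\'"; 'char in literal_to_placeholder' then lookup, else keep quotes
        mapLitGoA cs (i+4) (acc ++ ((pvLiteralDict.get? ['\\', '\'']).getD ('\'' :: ['\\', '\''] ++ ['\''])))
      else if i + 2 < cs.length ∧ cs.getD (i+2) ' ' = '\'' then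
        mapLitGoA cs (i+3) (acc ++ ((pvLiteralDict.get? [cs.getD (i+1) ' ']).getD ('\'' :: [cs.getD (i+1) ' '] ++ ['\''])))
      else
        mapLitGoA cs (i+1) (acc ++ [cs.getD i ' '])
    else
      mapLitGoA cs (i+1) (acc ++ [cs.getD i ' '])
  else acc
termination_by cs.length - i
decreasing_by all_goals omega

def map_literal_tokens (expresion : String) : String :=
  String.ofList (mapLitGoA expresion.toList 0 [])

-- ===== PORT B =====
-- the replacement function repl(m): group(1) is none for the escaped alternative
def pvRepl (whole : List Char) (g : Option Char) : List Char :=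
  let c : List Char := match g with
    | none => ['\\', '\'']
    | some ch => [ch]
  (pvLiteralDict.get? c).getD whole

-- hand port of re.sub(r"'\\''|'(.)'", repl, expresion) with re.DOTALL: the regex engine's leftmost
-- non-overlapping scan; both alternatives are fixed-length prefixes tried in the pattern's order,
-- '(.)' matches any one character (DOTALL), so this scan is exact for that pattern.
def pvReSub : List Char → List Char
  | '\'' :: '\\' :: '\'' :: '\'' :: rest => pvRepl ['\'', '\\', '\'', '\''] none ++ pvReSub rest
  | '\'' :: c :: '\'' :: rest => pvRepl ['\'', c, '\''] (some c) ++ pvReSub rest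
  | c :: rest => c :: pvReSub rest
  | [] => []

def map_literal_tokens_alt (expresion : String) : String :=
  String.ofList (pvReSub expresion.toList)

-- ===== PRECONDITION & SPEC =====
def Spec_map_literal_tokens (expresion : String) (out : String) : Prop := out = map_literal_tokens_alt expresion
instance (expresion : String) (out : String) : Decidable (Spec_map_literal_tokens expresion out) := by unfold Spec_map_literal_tokens; infer_instance

-- ===== CLAIM (what is proved, stated in full; the proofs are below) =====
def Claim_equal_map_literal_tokens : Prop := ∀ (expresion : String), Dom_map_literal_tokens expresion → Spec_map_literal_tokens expresion (map_literal_tokens expresion)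

-- ===== LEMMAS AND PROOFS =====

lemma pvReSub_cons (c : Char) (rest : List Char) (h : c ≠ '\'') :
    pvReSub (c :: rest) = c :: pvReSub rest := by
  exact pvReSub.eq_3 c rest (fun _ hc _ => h hc) (fun _ _ hc _ => h hc)

lemma pvReSub_esc (rest : List Char) :
    pvReSub ('\'' :: '\\' :: '\'' :: '\'' :: rest) = '\ue00b' :: pvReSub rest := rfl

lemma pvReSub_lit (c : Char) (rest : List Char)
    (h : ¬ (c = '\\' ∧ ∃ r', rest = '\'' :: r')) :
    pvReSub ('\'' :: c :: '\'' :: rest) = pvRepl ['\'', c, '\''] (some c) ++ pvReSub rest := by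
  exact pvReSub.eq_2 c rest (fun r1 hc hr => h ⟨hc, r1, hr⟩)

lemma pvReSub_one : pvReSub ['\''] = ['\''] := rfl

lemma pvReSub_nil : pvReSub [] = [] := rfl

lemma pvReSub_two (c : Char) : pvReSub ['\'', c] = '\'' :: pvReSub [c] := by
  exact pvReSub.eq_3 '\'' [c] (fun _ _ hr => by simp at hr) (fun _ _ _ hr => by simp at hr)

lemma pvReSub_noq (c1 c2 : Char) (rest : List Char) (h : c2 ≠ '\'') :
    pvReSub ('\'' :: c1 :: c2 :: rest) = '\'' :: pvReSub (c1 :: c2 :: rest) := by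
  refine pvReSub.eq_3 '\'' (c1 :: c2 :: rest) ?_ ?_
  · intro r1 _ hr
    injection hr with _ hr; injection hr with hc _
    exact h hc
  · intro c' r1 _ hr
    injection hr with _ hr; injection hr with hc _
    exact h hc

lemma mapLitGoA_eq (cs : List Char) (i : Nat) (acc : List Char) :
    mapLitGoA cs i acc = acc ++ pvReSub (cs.drop i) := by
  fun_induction mapLitGoA cs i acc with
  | case1 i acc h hq h3 ih =>
    -- escaped literal '\'' at i
    obtain ⟨hl, h1, h2, h3'⟩ := h3
    rw [ih, List.drop_eq_getElem_cons (show i < cs.length by omega),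
        List.drop_eq_getElem_cons (show i + 1 < cs.length by omega),
        List.drop_eq_getElem_cons (show i + 2 < cs.length by omega),
        List.drop_eq_getElem_cons (show i + 3 < cs.length by omega)]
    rw [List.getD_eq_getElem cs ' ' (by omega)] at hq h1 h2 h3'
    rw [hq, h1, h2, h3', pvReSub_esc]
    rw [show (pvLiteralDict.get? ['\\', '\'']).getD (['\'', '\\', '\''] ++ ['\'']) = ['\ue00b'] from rfl]
    simp
  | case2 i acc h hq h3 h2 ih =>
    -- single-char literal 'X' at i
    obtain ⟨hl2, hq2⟩ := h2
    rw [ih, List.drop_eq_getElem_cons (show i < cs.length from h),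
        List.drop_eq_getElem_cons (show i + 1 < cs.length by omega),
        List.drop_eq_getElem_cons (show i + 2 < cs.length by omega)]
    rw [List.getD_eq_getElem cs ' ' h] at hq
    rw [List.getD_eq_getElem cs ' ' (by omega)] at hq2
    rw [List.getD_eq_getElem cs ' ' (by omega)]
    rw [hq, hq2, pvReSub_lit]
    · simp [pvRepl]
    · rintro ⟨hbs, r', hr'⟩
      by_cases hl3 : i + 3 < cs.length
      · rw [List.drop_eq_getElem_cons (show i + 3 < cs.length by omega)] at hr'
        injection hr' with hh _
        exact h3 ⟨hl3, by rw [List.getD_eq_getElem cs ' ' (by omega)]; exact hbs,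
          by rw [List.getD_eq_getElem cs ' ' (by omega)]; exact hq2,
          by rw [List.getD_eq_getElem cs ' ' (by omega)]; exact hh⟩
      · rw [List.drop_eq_nil_iff.mpr (by omega)] at hr'
        simp at hr'
  | case3 i acc h hq h3 h2 ih =>
    -- quote at i but no literal form: copy one char
    rw [ih, List.drop_eq_getElem_cons (show i < cs.length from h)]
    rw [List.getD_eq_getElem cs ' ' h] at hq ⊢
    rw [hq]
    by_cases hl1 : i + 1 < cs.length
    · by_cases hl2 : i + 2 < cs.length
      · -- three chars available; cs[i+2] ≠ '\'' from ¬h2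
        have hq2 : cs[i+2]'(by omega) ≠ '\'' := by
          intro hx
          exact h2 ⟨hl2, by rw [List.getD_eq_getElem cs ' ' (by omega)]; exact hx⟩
        rw [List.drop_eq_getElem_cons (show i + 1 < cs.length by omega),
            List.drop_eq_getElem_cons (show i + 2 < cs.length by omega),
            pvReSub_noq _ _ _ hq2]
        simp
      · -- exactly two chars left
        have hd2 : cs.drop (i+2) = [] := List.drop_eq_nil_iff.mpr (by omega)
        rw [List.drop_eq_getElem_cons (show i + 1 < cs.length by omega), hd2, pvReSub_two]
        simp
    · -- exactly one char left
      have hd1 : cs.drop (i+1) = [] := List.drop_eq_nil_iff.mpr (by omega)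
      rw [hd1, pvReSub_one]
      simp [pvReSub_nil]
  | case4 i acc h hq ih =>
    -- ordinary character
    rw [ih, List.drop_eq_getElem_cons (show i < cs.length from h)]
    rw [List.getD_eq_getElem cs ' ' h] at hq
    rw [pvReSub_cons _ _ hq]
    simp [List.getElem?_eq_getElem h]
  | case5 i acc h =>
    rw [List.drop_eq_nil_iff.mpr (by omega)]
    simp [pvReSub]

-- ===== VERDICT (by name: the statement is the Claim_ definition above) =====
theorem map_literal_tokens_spec : Claim_equal_map_literal_tokens := by
  intro e _
  show map_literal_tokens e = map_literal_tokens_alt e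
  unfold map_literal_tokens map_literal_tokens_alt
  rw [mapLitGoA_eq]
  simp
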